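-- pv_equiv track=rewrite | github.com/Blurgyy/kaggle | mnist/nn/3_layer/nn.py | sample_batches
-- ===== SOURCE A (Python) =====
-- def sample_batches(training_set, batch_size):
--     batch = [];
--     ret = [];
--     for elem in training_set:
--         batch.append(elem);
--         if(len(batch) == batch_size):
--             ret.append(batch);
--             batch = [];
--     if(len(batch) > 0):
--         ret.append(batch);
--     return ret;
-- ===== SOURCE B (Python) =====
-- def sample_batches(training_set, batch_size):
--     if not training_set:
--         return []
--     n = len(training_set)
--     cuts = list(range(batch_size, n, batch_size))
--     return [training_set[a:b] for a, b in zip([0] + cuts, cuts + [n])]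
-- ===== Notes on version B (the rewrite author's own statement) =====
-- stated objective: idiomatic
-- what changed: Replaces the element-by-element accumulator loop with a length-check branch and trailing flush by computing the cut positions range(batch_size, n, batch_size) once and slicing between consecutive cut points with zip([0]+cuts, cuts+[n]); Pre_ excludes only batch_size == 0, where A returns one catch-all batch but B's range step of 0 raises ValueError.
-- outside the precondition, e.g. on sample_batches([[1], [2]], 0): A returns [[[1], [2]]], B raises ValueError
import Mathlib
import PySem

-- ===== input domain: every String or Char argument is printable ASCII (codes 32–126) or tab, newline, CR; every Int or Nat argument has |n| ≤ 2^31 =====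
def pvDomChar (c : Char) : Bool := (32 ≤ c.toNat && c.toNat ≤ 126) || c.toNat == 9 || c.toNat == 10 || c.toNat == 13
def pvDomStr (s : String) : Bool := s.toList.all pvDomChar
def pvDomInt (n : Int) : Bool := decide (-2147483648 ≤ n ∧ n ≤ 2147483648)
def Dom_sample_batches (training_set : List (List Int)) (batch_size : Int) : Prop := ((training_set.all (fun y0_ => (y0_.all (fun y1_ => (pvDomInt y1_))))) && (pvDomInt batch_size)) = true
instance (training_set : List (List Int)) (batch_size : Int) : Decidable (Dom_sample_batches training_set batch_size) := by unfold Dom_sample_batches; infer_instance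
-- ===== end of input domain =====

-- B replaces A's element-by-element accumulator loop (with flush) by slicing between consecutive cut points zip([0]+cuts, cuts+[n]): idiomatic, same cost.


-- ===== PORT A =====
-- for-loop over training_set carrying (batch, ret); flush the leftover batch at the end
def sample_batches (training_set : List (List Int)) (batch_size : Int) : List (List (List Int)) :=
  let st := training_set.foldl
    (fun (s : List (List Int) × List (List (List Int))) elem =>
      let batch := s.1 ++ [elem]
      if (batch.length : Int) = batch_size then ([], s.2 ++ [batch]) else (batch, s.2))
    ([], [])
  if st.1.length > 0 then st.2 ++ [st.1] else st.2

-- ===== PORT B =====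
-- if not training_set: return []; cuts = list(range(batch_size, n, batch_size));
-- [training_set[a:b] for a, b in zip([0] + cuts, cuts + [n])]
def sample_batches_alt (training_set : List (List Int)) (batch_size : Int) : List (List (List Int)) :=
  if training_set = [] then []
  else
    let n : Int := (training_set.length : Int)
    let cuts := PySem.List.pyRange batch_size n batch_size
    (([(0 : Int)] ++ cuts).zip (cuts ++ [n])).map
      (fun ab => PySem.List.slice training_set (some ab.1) (some ab.2))

-- ===== PRECONDITION & SPEC =====
-- Pre_ excludes only batch_size == 0, where A's never-firing length check returns one catch-all
-- batch while B's range(batch_size, n, 0) raises ValueError.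
def Pre_sample_batches (training_set : List (List Int)) (batch_size : Int) : Prop := batch_size ≠ 0
instance (training_set : List (List Int)) (batch_size : Int) : Decidable (Pre_sample_batches training_set batch_size) := by unfold Pre_sample_batches; infer_instance
def pvWitness_sample_batches : List (List Int) × Int := ([[1, 2], [3], [4], [5]], 2)

def Spec_sample_batches (training_set : List (List Int)) (batch_size : Int) (out : List (List (List Int))) : Prop := out = sample_batches_alt training_set batch_size
instance (training_set : List (List Int)) (batch_size : Int) (out : List (List (List Int))) : Decidable (Spec_sample_batches training_set batch_size out) := by unfold Spec_sample_batches; infer_instance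

-- ===== CLAIM (what is proved, stated in full; the proofs are below) =====
def Claim_equal_sample_batches : Prop := ∀ (training_set : List (List Int)) (batch_size : Int), Dom_sample_batches training_set batch_size → Pre_sample_batches training_set batch_size → Spec_sample_batches training_set batch_size (sample_batches training_set batch_size)

-- ===== LEMMAS AND PROOFS =====

-- the let-free form of port B
theorem alt_def (ts : List (List Int)) (bs : Int) :
    sample_batches_alt ts bs
      = if ts = [] then []
        else (([(0 : Int)] ++ PySem.List.pyRange bs ((ts.length : Int)) bs).zip
                (PySem.List.pyRange bs ((ts.length : Int)) bs ++ [((ts.length : Int))])).map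
               (fun ab => PySem.List.slice ts (some ab.1) (some ab.2)) := rfl

-- Reference chunking: groups of size bs (bs ≥ 1 in all uses), last group possibly short.
def chunks (bs : Nat) : List (List Int) → List (List (List Int))
  | [] => []
  | x :: xs => (x :: xs.take (bs - 1)) :: chunks bs (xs.drop (bs - 1))
  termination_by ts => ts.length
  decreasing_by
    simp only [List.length_cons, List.length_drop]
    omega

-- A-side: the fold with accumulator (cur, ret) produces ret ++ chunks of (cur ++ ts).
theorem foldA_eq_chunks (bs : Int) (hbs : 1 ≤ bs) :
    ∀ (ts cur : List (List Int)) (ret : List (List (List Int))),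
      cur.length < bs.toNat →
      (let st := ts.foldl
          (fun (s : List (List Int) × List (List (List Int))) elem =>
            let batch := s.1 ++ [elem]
            if (batch.length : Int) = bs then ([], s.2 ++ [batch]) else (batch, s.2))
          (cur, ret)
       if st.1.length > 0 then st.2 ++ [st.1] else st.2)
      = ret ++ chunks bs.toNat (cur ++ ts) := by
  intro ts
  induction ts with
  | nil =>
    intro cur ret hcur
    simp only [List.foldl_nil, List.append_nil]
    cases cur with
    | nil => simp [chunks]
    | cons x xs =>
      have h1 : xs.take (bs.toNat - 1) = xs := by
        apply List.take_of_length_le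
        simp only [List.length_cons] at hcur; omega
      have h2 : xs.drop (bs.toNat - 1) = [] := by
        apply List.drop_eq_nil_of_le
        simp only [List.length_cons] at hcur; omega
      simp [chunks, h1, h2]
  | cons e rest ih =>
    intro cur ret hcur
    simp only [List.foldl_cons]
    by_cases hfull : ((cur ++ [e]).length : Int) = bs
    · have hlen : cur.length + 1 = bs.toNat := by
        simp only [List.length_append, List.length_singleton] at hfull; omega
      rw [if_pos hfull]
      rw [ih [] (ret ++ [cur ++ [e]]) (by simp only [List.length_nil]; omega)]
      have hchunk : chunks bs.toNat (cur ++ e :: rest)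
          = (cur ++ [e]) :: chunks bs.toNat rest := by
        cases cur with
        | nil =>
          simp only [List.length_nil] at hlen
          have h0 : bs.toNat - 1 = 0 := by omega
          simp [chunks, h0]
        | cons c cs =>
          have h1 : bs.toNat - 1 = cs.length + 1 := by
            simp only [List.length_cons] at hlen; omega
          have htk : (cs ++ e :: rest).take (bs.toNat - 1) = cs ++ [e] := by
            rw [h1, List.take_append]
            simp
          have hdp : (cs ++ e :: rest).drop (bs.toNat - 1) = rest := by
            rw [h1, List.drop_append]
            simp
          simp [chunks, htk, hdp]
      rw [hchunk]
      simp
    · have hlt : (cur ++ [e]).length < bs.toNat := by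
        simp only [List.length_append, List.length_singleton] at hfull ⊢
        omega
      rw [if_neg hfull]
      rw [ih (cur ++ [e]) ret hlt]
      simp

theorem A_eq_chunks (ts : List (List Int)) (bs : Int) (hbs : 1 ≤ bs) :
    sample_batches ts bs = chunks bs.toNat ts := by
  have := foldA_eq_chunks bs hbs ts [] [] (by simp only [List.length_nil]; omega)
  simpa [sample_batches] using this

-- pyRange with a positive step: nil and cons forms, and a start shift.
theorem pyRange_pos_nil (a b s : Int) (hs : 0 < s) (hba : b ≤ a) :
    PySem.List.pyRange a b s = [] := by
  rw [PySem.List.pyRange_of_pos a b hs, if_neg (by omega)]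
  simp

theorem pyRange_pos_cons (a b s : Int) (hs : 0 < s) (hab : a < b) :
    PySem.List.pyRange a b s = a :: PySem.List.pyRange (a + s) b s := by
  rw [PySem.List.pyRange_of_pos a b hs, PySem.List.pyRange_of_pos (a + s) b hs,
      if_pos hab]
  have hdiv : (b - a + s - 1) / s = (b - a - 1) / s + 1 := by
    have := Int.add_mul_ediv_right (b - a - 1) 1 (by omega : s ≠ 0)
    have he : b - a + s - 1 = b - a - 1 + 1 * s := by ring
    rw [he, this]
  have hq0 : 0 ≤ (b - a - 1) / s := Int.ediv_nonneg (by omega) (by omega)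
  have hcnt : ((b - a + s - 1) / s).toNat = ((b - a - 1) / s).toNat + 1 := by
    rw [hdiv]; omega
  have hcnt2 : (if a + s < b then ((b - (a + s) + s - 1) / s).toNat else 0)
      = ((b - a - 1) / s).toNat := by
    by_cases h2 : a + s < b
    · rw [if_pos h2]
      congr 2
      ring_nf
    · rw [if_neg h2]
      have : (b - a - 1) / s = 0 := Int.ediv_eq_zero_of_lt (by omega) (by omega)
      rw [this]; simp
  rw [hcnt, hcnt2, List.range_succ_eq_map]
  simp only [List.map_cons, List.map_map]
  congr 1
  · simp
  · apply List.map_congr_left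
    intro k _
    simp only [Function.comp_apply]
    push_cast
    ring

theorem pyRange_pos_shift (a b c s : Int) (hs : 0 < s) :
    PySem.List.pyRange (c + a) (c + b) s
      = (PySem.List.pyRange a b s).map (fun x => c + x) := by
  rw [PySem.List.pyRange_of_pos (c + a) (c + b) hs, PySem.List.pyRange_of_pos a b hs]
  have hif : (if c + a < c + b then (((c + b) - (c + a) + s - 1) / s).toNat else 0)
      = (if a < b then ((b - a + s - 1) / s).toNat else 0) := by
    by_cases h : a < b
    · rw [if_pos (by omega), if_pos h]
      congr 2; ring_nf
    · rw [if_neg (by omega), if_neg h]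
  rw [hif, List.map_map]
  apply List.map_congr_left
  intro k _
  simp only [Function.comp_apply]
  ring

theorem pyRange_neg_nil (a b s : Int) (hs : s < 0) (hab : a ≤ b) :
    PySem.List.pyRange a b s = [] := by
  unfold PySem.List.pyRange
  split_ifs <;> first | rfl | omega

theorem slice_zero_len (ts : List (List Int)) :
    PySem.List.slice ts (some 0) (some ((ts.length : Int))) = ts := by
  rw [PySem.List.slice_zero_start, PySem.List.slice_to _ (by exact_mod_cast Nat.zero_le _)]
  simp

-- B-side: the zip of consecutive cut points also computes chunks (bs ≥ 1).
theorem B_eq_chunks_aux (bs : Int) (hbs : 1 ≤ bs) :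
    ∀ (n : Nat) (ts : List (List Int)), ts.length ≤ n →
      sample_batches_alt ts bs = chunks bs.toNat ts := by
  intro n
  induction n with
  | zero =>
    intro ts hts
    have : ts = [] := List.eq_nil_of_length_eq_zero (by omega)
    subst this
    simp [alt_def, chunks]
  | succ m ih =>
    intro ts hts
    cases ts with
    | nil => simp [alt_def, chunks]
    | cons x xs =>
      rw [alt_def, if_neg (List.cons_ne_nil x xs)]
      by_cases hbN : ((x :: xs).length : Int) ≤ bs
      · -- a single (possibly short) batch: cuts is empty
        rw [pyRange_pos_nil bs ((x :: xs).length : Int) bs (by omega) hbN]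
        simp only [List.append_nil, List.nil_append, List.zip_cons_cons, List.zip_nil_right,
          List.map_cons, List.map_nil]
        rw [slice_zero_len]
        have h1 : xs.take (bs.toNat - 1) = xs := by
          apply List.take_of_length_le
          simp only [List.length_cons, Nat.cast_add, Nat.cast_one] at hbN
          omega
        have h2 : xs.drop (bs.toNat - 1) = [] := by
          apply List.drop_eq_nil_of_le
          simp only [List.length_cons, Nat.cast_add, Nat.cast_one] at hbN
          omega
        conv_rhs => rw [chunks]
        rw [h1, h2]
        simp [chunks]
      · -- at least one full batch: cuts = bs :: shifted cuts of the dropped tail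
        have hbN' : bs < ((x :: xs).length : Int) := by omega
        have hdrop : (x :: xs).drop bs.toNat = xs.drop (bs.toNat - 1) := by
          have h : bs.toNat = (bs.toNat - 1) + 1 := by omega
          conv_lhs => rw [h]
          rw [List.drop_succ_cons]
        have hlen' : (((xs.drop (bs.toNat - 1)).length : Nat) : Int)
            = ((x :: xs).length : Int) - bs := by
          simp only [List.length_drop, List.length_cons] at hbN' ⊢
          omega
        have hne' : xs.drop (bs.toNat - 1) ≠ [] := by
          intro h
          rw [h] at hlen'
          simp only [List.length_nil, Nat.cast_zero] at hlen'
          omega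
        rw [pyRange_pos_cons bs ((x :: xs).length : Int) bs (by omega) hbN']
        have hshift : PySem.List.pyRange (bs + bs) ((x :: xs).length : Int) bs
            = (PySem.List.pyRange bs (((x :: xs).length : Int) - bs) bs).map (fun i => bs + i) := by
          have h := pyRange_pos_shift bs (((x :: xs).length : Int) - bs) bs bs (by omega)
          rw [show bs + (((x :: xs).length : Int) - bs) = ((x :: xs).length : Int) by ring] at h
          exact h
        rw [hshift]
        simp only [List.cons_append, List.zip_cons_cons, List.map_cons]
        simp only [List.nil_append]
        -- present both zip components as maps of (bs + ·)
        have hl1 : bs ::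
              (PySem.List.pyRange bs (((x :: xs).length : Int) - bs) bs).map (fun i => bs + i)
            = ((0 : Int) :: PySem.List.pyRange bs (((x :: xs).length : Int) - bs) bs).map
                (fun i => bs + i) := by
          simp
        have hl2 : (PySem.List.pyRange bs (((x :: xs).length : Int) - bs) bs).map (fun i => bs + i)
              ++ [((x :: xs).length : Int)]
            = (PySem.List.pyRange bs (((x :: xs).length : Int) - bs) bs
                ++ [((x :: xs).length : Int) - bs]).map (fun i => bs + i) := by
          rw [List.map_append]
          simp only [List.map_cons, List.map_nil]
          rw [show bs + (((x :: xs).length : Int) - bs) = ((x :: xs).length : Int) by ring]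
        rw [hl1, hl2, List.zip_map, List.map_map]
        -- head batch
        have hhead : PySem.List.slice (x :: xs) (some 0) (some bs)
            = x :: xs.take (bs.toNat - 1) := by
          rw [PySem.List.slice_zero_start, PySem.List.slice_to _ (by omega)]
          rw [List.take_cons (by omega)]
        -- tail batches are the batches of the dropped tail
        have htail : ((((0 : Int) :: PySem.List.pyRange bs (((x :: xs).length : Int) - bs) bs).zip
              (PySem.List.pyRange bs (((x :: xs).length : Int) - bs) bs
                ++ [((x :: xs).length : Int) - bs])).map
              ((fun ab => PySem.List.slice (x :: xs) (some ab.1) (some ab.2)) ∘ Prod.map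
                (fun i => bs + i) (fun i => bs + i)))
            = (((0 : Int) :: PySem.List.pyRange bs (((x :: xs).length : Int) - bs) bs).zip
                (PySem.List.pyRange bs (((x :: xs).length : Int) - bs) bs
                  ++ [((x :: xs).length : Int) - bs])).map
              (fun ab => PySem.List.slice (xs.drop (bs.toNat - 1)) (some ab.1) (some ab.2)) := by
          apply List.map_congr_left
          intro p hp
          obtain ⟨hp1, hp2⟩ := List.of_mem_zip (a := p.1) (b := p.2) (by simpa using hp)
          have ha0 : 0 ≤ p.1 := by
            rcases List.mem_cons.1 hp1 with h | h
            · omega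
            · have := ((PySem.List.mem_pyRange_iff_of_pos (by omega : (0:Int) < bs) p.1).1 h).1
              omega
          have hd0 : (0 : Int) ≤ ((x :: xs).length : Int) - bs := by
            rw [← hlen']
            exact Int.natCast_nonneg _
          simp only [List.length_cons] at hd0
          push_cast at hd0
          have hb0 : 0 ≤ p.2 := by
            rcases List.mem_append.1 hp2 with h | h
            · have := ((PySem.List.mem_pyRange_iff_of_pos (by omega : (0:Int) < bs) p.2).1 h).1
              exact le_trans (by omega : (0:Int) ≤ bs) this
            · rw [List.mem_singleton] at h
              omega
          simp only [Function.comp_apply, Prod.map_fst, Prod.map_snd]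
          rw [PySem.List.slice_toNat _ (by omega) (by omega),
              PySem.List.slice_toNat _ (by omega) (by omega), ← hdrop, List.drop_drop]
          congr 1
          · omega
          · congr 1
            omega
        rw [hhead, htail]
        -- the tail is exactly port B on the dropped list; apply the induction hypothesis
        have hrec := ih (xs.drop (bs.toNat - 1))
          (by simp only [List.length_drop]
              simp only [List.length_cons] at hts
              omega)
        rw [alt_def, if_neg hne', hlen'] at hrec
        simp only [List.singleton_append] at hrec
        rw [hrec]
        conv_rhs => rw [chunks]

-- negative batch size: A accumulates everything into one flushed batch; B's cut-point range
-- is empty, leaving the single slice [0:n].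
theorem foldA_neg (bs : Int) (hbs : bs ≤ 0) :
    ∀ (ts cur : List (List Int)) (ret : List (List (List Int))),
      ts.foldl
        (fun (s : List (List Int) × List (List (List Int))) elem =>
          let batch := s.1 ++ [elem]
          if (batch.length : Int) = bs then ([], s.2 ++ [batch]) else (batch, s.2))
        (cur, ret) = (cur ++ ts, ret) := by
  intro ts
  induction ts with
  | nil => intro cur ret; simp
  | cons e rest ih =>
    intro cur ret
    simp only [List.foldl_cons]
    rw [if_neg (by simp only [List.length_append, List.length_singleton]; omega)]
    rw [ih (cur ++ [e]) ret]
    simp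

theorem A_neg (ts : List (List Int)) (bs : Int) (hbs : bs ≤ 0) :
    sample_batches ts bs = if ts = [] then [] else [ts] := by
  unfold sample_batches
  rw [foldA_neg bs hbs ts [] []]
  cases ts <;> simp

theorem B_neg (ts : List (List Int)) (bs : Int) (hbs : bs < 0) :
    sample_batches_alt ts bs = if ts = [] then [] else [ts] := by
  rw [alt_def]
  by_cases h : ts = []
  · rw [if_pos h, if_pos h]
  · rw [if_neg h, if_neg h,
        pyRange_neg_nil bs ((ts.length : Int)) bs hbs (by omega)]
    simp only [List.append_nil, List.nil_append, List.zip_cons_cons, List.zip_nil_right,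
      List.map_cons, List.map_nil]
    rw [slice_zero_len]

-- ===== VERDICT (by name: the statement is the Claim_ definition above) =====
theorem sample_batches_spec : Claim_equal_sample_batches := by
  intro ts bs _ hpre
  unfold Spec_sample_batches
  by_cases hb : 1 ≤ bs
  · rw [A_eq_chunks ts bs hb, B_eq_chunks_aux bs hb ts.length ts le_rfl]
  · have hneg : bs < 0 := by
      unfold Pre_sample_batches at hpre; omega
    rw [A_neg ts bs (by omega), B_neg ts bs hneg]
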